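-- pv_equiv track=rewrite | github.com/mateidiana/PythonLabs | Lab2/u3.py | konkat
-- ===== SOURCE A (Python) =====
-- def konkat(l):
--     z=''
--     #sort desc
--     for i in range(len(l)):
--         for j in range(len(l)-1):
--             if l[i]>l[j]:
--                 aux=l[i]                         #fallend sortiert
--                 l[i]=l[j]
--                 l[j]=aux
--
--     for i in range(len(l)):
--         z=z+str(l[i])                            #konkatenation- vorne die hochsten Zahlen
--
--     return z
-- ===== SOURCE B (Python) =====
-- def _merge_desc(a, b):
--     out = []
--     i = j = 0
--     while i < len(a) and j < len(b):
--         if a[i] >= b[j]: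
--             out.append(a[i]); i += 1
--         else:
--             out.append(b[j]); j += 1
--     out += a[i:]
--     out += b[j:]
--     return out
--
--
-- def _msort_desc(a):
--     if len(a) <= 1:
--         return a[:]
--     mid = len(a) // 2
--     return _merge_desc(_msort_desc(a[:mid]), _msort_desc(a[mid:]))
--
--
-- def konkat(l):
--     l[:] = _msort_desc(l)           # keep A's observable in-place mutation of l
--     return ''.join(str(x) for x in l)
-- ===== Notes on version B (the rewrite author's own statement) =====
-- stated objective: faster
-- what changed: Replaced the O(n^2) nested-loop exchange sort with a recursive top-down merge sort in descending order (split, recurse, merge by larger front element), keeping the final string concatenation; also writes the sorted list back via l[:] to preserve A's in-place mutation.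
import Mathlib
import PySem

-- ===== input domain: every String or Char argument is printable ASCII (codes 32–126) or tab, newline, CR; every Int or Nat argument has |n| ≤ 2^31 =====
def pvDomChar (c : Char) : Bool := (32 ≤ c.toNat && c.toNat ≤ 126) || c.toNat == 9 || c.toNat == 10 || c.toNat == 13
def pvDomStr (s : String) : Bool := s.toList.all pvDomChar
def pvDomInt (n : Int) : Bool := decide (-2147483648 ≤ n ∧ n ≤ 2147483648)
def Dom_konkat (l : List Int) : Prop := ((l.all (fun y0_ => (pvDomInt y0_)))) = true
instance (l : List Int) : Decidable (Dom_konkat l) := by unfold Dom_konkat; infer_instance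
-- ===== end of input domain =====

-- B replaces A's O(n^2) exchange sort with a recursive merge sort (descending); the
-- equivalence proved here is about the RETURN value only (A sorts its argument in
-- place; B's Python mirrors that mutation via l[:] = ...).

-- ===== PORT A =====
-- 'if l[i]>l[j]: aux=l[i]; l[i]=l[j]; l[j]=aux'  (indices always in range here, so l[i] is pyGetD)
def konkatStep (a : List Int) (i j : Int) : List Int :=
  if PySem.List.pyGetD a i 0 > PySem.List.pyGetD a j 0 then
    let aux := PySem.List.pyGetD a i 0
    let a1 := PySem.List.pySetD a i (PySem.List.pyGetD a j 0)
    PySem.List.pySetD a1 j aux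
  else a

def konkat (l : List Int) : String :=
  -- the two nested sorting loops, mutating l
  let s := (PySem.List.pyRange 0 (PySem.List.len l) 1).foldl
    (fun a i => (PySem.List.pyRange 0 (PySem.List.len l - 1) 1).foldl
      (fun a j => konkatStep a i j) a) l
  -- z = ''; for i in range(len(l)): z = z + str(l[i])
  (PySem.List.pyRange 0 (PySem.List.len l) 1).foldl
    (fun z i => z ++ PySem.Int.toStr (PySem.List.pyGetD s i 0)) ""

-- ===== PORT B =====
-- merge of two descending runs: take the larger front element first
def mergeDesc : List Int → List Int → List Int
  | [], ys => ys
  | x :: xs, [] => x :: xs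
  | x :: xs, y :: ys =>
    if x ≥ y then x :: mergeDesc xs (y :: ys) else y :: mergeDesc (x :: xs) ys

-- top-down merge sort, descending; a[:mid]/a[mid:] are take/drop (mid = len//2 is in range)
def msortDesc (a : List Int) : List Int :=
  if a.length ≤ 1 then a
  else
    mergeDesc (msortDesc (a.take (a.length / 2))) (msortDesc (a.drop (a.length / 2)))
termination_by a.length
decreasing_by
  · simp only [List.length_take]; omega
  · simp only [List.length_drop]; omega

def konkat_alt (l : List Int) : String :=
  let m := msortDesc l
  PySem.Str.join "" (m.map PySem.Int.toStr)

-- ===== PRECONDITION & SPEC =====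
def Spec_konkat (l : List Int) (out : String) : Prop := out = konkat_alt l
instance (l : List Int) (out : String) : Decidable (Spec_konkat l out) := by unfold Spec_konkat; infer_instance

-- ===== CLAIM (what is proved, stated in full; the proofs are below) =====
def Claim_equal_konkat : Prop := ∀ (l : List Int), Dom_konkat l → Spec_konkat l (konkat l)

-- ===== LEMMAS AND PROOFS =====

-- descending-sorted
def DSorted (m : List Int) : Prop := List.Pairwise (fun a b : Int => b ≤ a) m

-- Nat-index version of A's swap step (pyGetD/pySetD at a Nat cast are getD/set)
def stepN (a : List Int) (i j : Nat) : List Int :=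
  if a.getD i 0 > a.getD j 0 then (a.set i (a.getD j 0)).set j (a.getD i 0) else a

lemma konkatStep_natCast (a : List Int) (i j : Nat) :
    konkatStep a (i : Int) (j : Int) = stepN a i j := by
  simp [konkatStep, stepN]

-- the segment of positions j..i-1
def seg (a : List Int) (j i : Nat) : List Int := (a.drop j).take (i - j)

lemma take_set_succ (a : List Int) (j : Nat) (v : Int) (h : j < a.length) :
    (a.set j v).take (j + 1) = a.take j ++ [v] := by
  rw [List.take_add_one]
  simp [List.take_set_of_le (le_refl j), h]

lemma take_succ_eq (a : List Int) (n : Nat) (h : n < a.length) :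
    a.take (n + 1) = a.take n ++ [a[n]] := by
  rw [List.take_add_one]
  simp [List.getElem?_eq_getElem h]

lemma seg_cons (a : List Int) (j i : Nat) (h1 : j < i) (h2 : j < a.length) :
    seg a j i = a[j] :: seg a (j + 1) i := by
  unfold seg
  rw [List.drop_eq_getElem_cons h2]
  have : i - j = (i - (j + 1)) + 1 := by omega
  rw [this, List.take_succ_cons]

lemma seg_set_out (a : List Int) (v : Int) (m j i : Nat) (h : m < j ∨ i ≤ m) :
    seg (a.set m v) j i = seg a j i := by
  unfold seg
  apply List.ext_getElem
  · simp
  · intro p hp hq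
    have hpi : p < i - j := lt_of_lt_of_le hp (List.length_take_le _ _)
    simp only [List.getElem_take, List.getElem_drop]
    rw [List.getElem_set_ne (by omega)]

-- phase 1 of the inner loop (j scanning below i): insertion of a[i] into the sorted prefix
lemma step1 (i j : Nat) (a : List Int) (hji : j < i) (hi : i < a.length)
    (H2 : DSorted (a.take j)) (H3 : DSorted (seg a j i))
    (H4 : ∀ e ∈ a.take j, a.getD i 0 ≤ e)
    (H5 : ∀ e ∈ a.take j, ∀ f ∈ seg a j i, f ≤ e) :
    (stepN a i j).Perm a ∧ (stepN a i j).length = a.length ∧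
    DSorted ((stepN a i j).take (j + 1)) ∧ DSorted (seg (stepN a i j) (j + 1) i) ∧
    (∀ e ∈ (stepN a i j).take (j + 1), (stepN a i j).getD i 0 ≤ e) ∧
    (∀ e ∈ (stepN a i j).take (j + 1), ∀ f ∈ seg (stepN a i j) (j + 1) i, f ≤ e) := by
  have hj : j < a.length := lt_trans hji hi
  have hij : i ≠ j := Nat.ne_of_gt hji
  rw [seg_cons a j i hji hj] at H3 H5
  have H3' : DSorted (seg a (j + 1) i) := H3.of_cons
  have Hhead : ∀ f ∈ seg a (j + 1) i, f ≤ a[j] := fun f hf => List.rel_of_pairwise_cons H3 hf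
  unfold stepN
  rw [List.getD_eq_getElem a 0 hi, List.getD_eq_getElem a 0 hj] at *
  by_cases hc : a[i] > a[j]
  · rw [if_pos hc]
    have hbt : ((a.set i a[j]).set j a[i]).take (j + 1) = a.take j ++ [a[i]] := by
      rw [take_set_succ _ j _ (by simpa using hj), List.take_set_of_le (le_of_lt hji)]
    have hbs : seg ((a.set i a[j]).set j a[i]) (j + 1) i = seg a (j + 1) i := by
      rw [seg_set_out _ _ j _ _ (Or.inl (by omega)), seg_set_out _ _ i _ _ (Or.inr (le_refl i))]
    have hbi : ((a.set i a[j]).set j a[i]).getD i 0 = a[j] := by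
      rw [List.getD_eq_getElem _ 0 (by simpa using hi), List.getElem_set_ne (by omega),
        List.getElem_set_self]
    rw [hbt, hbs, hbi]
    refine ⟨List.set_set_perm hi hj, by simp, ?_, H3', ?_, ?_⟩
    · rw [DSorted, List.pairwise_append]
      exact ⟨H2, List.pairwise_singleton _ _, fun e he b hb => by
        rcases List.mem_singleton.mp hb with rfl; exact H4 e he⟩
    · intro e he
      rcases List.mem_append.mp he with he | he
      · exact H5 e he a[j] List.mem_cons_self
      · rcases List.mem_singleton.mp he with rfl; exact le_of_lt hc
    · intro e he f hf
      rcases List.mem_append.mp he with he | he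
      · exact H5 e he f (List.mem_cons_of_mem _ hf)
      · rcases List.mem_singleton.mp he with rfl
        exact le_trans (Hhead f hf) (le_of_lt hc)
  · rw [if_neg hc]
    have hle : a[i] ≤ a[j] := le_of_not_gt hc
    rw [take_succ_eq a j hj, List.getD_eq_getElem a 0 hi]
    refine ⟨List.Perm.refl a, rfl, ?_, H3', ?_, ?_⟩
    · rw [DSorted, List.pairwise_append]
      exact ⟨H2, List.pairwise_singleton _ _, fun e he b hb => by
        rcases List.mem_singleton.mp hb with rfl
        exact H5 e he a[j] List.mem_cons_self⟩
    · intro e he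
      rcases List.mem_append.mp he with he | he
      · exact H4 e he
      · rcases List.mem_singleton.mp he with rfl; exact hle
    · intro e he f hf
      rcases List.mem_append.mp he with he | he
      · exact H5 e he f (List.mem_cons_of_mem _ hf)
      · rcases List.mem_singleton.mp he with rfl; exact Hhead f hf

lemma phase1 (i : Nat) : ∀ (k j : Nat) (a : List Int), j + k ≤ i → i < a.length →
    DSorted (a.take j) → DSorted (seg a j i) →
    (∀ e ∈ a.take j, a.getD i 0 ≤ e) →
    (∀ e ∈ a.take j, ∀ f ∈ seg a j i, f ≤ e) →
    ((List.range' j k).foldl (fun a j => stepN a i j) a).Perm a ∧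
    ((List.range' j k).foldl (fun a j => stepN a i j) a).length = a.length ∧
    DSorted (((List.range' j k).foldl (fun a j => stepN a i j) a).take (j + k)) ∧
    DSorted (seg ((List.range' j k).foldl (fun a j => stepN a i j) a) (j + k) i) ∧
    (∀ e ∈ ((List.range' j k).foldl (fun a j => stepN a i j) a).take (j + k),
      ((List.range' j k).foldl (fun a j => stepN a i j) a).getD i 0 ≤ e) ∧
    (∀ e ∈ ((List.range' j k).foldl (fun a j => stepN a i j) a).take (j + k),
      ∀ f ∈ seg ((List.range' j k).foldl (fun a j => stepN a i j) a) (j + k) i, f ≤ e) := by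
  intro k
  induction k with
  | zero => intro j a _ _ h2 h3 h4 h5; exact ⟨List.Perm.refl a, rfl, h2, h3, h4, h5⟩
  | succ k ih =>
    intro j a hk hi h2 h3 h4 h5
    rw [List.range'_succ, List.foldl_cons]
    obtain ⟨p1, l1, s2, s3, s4, s5⟩ := step1 i j a (by omega) hi h2 h3 h4 h5
    have hadd : j + (k + 1) = (j + 1) + k := by omega
    rw [hadd]
    obtain ⟨q1, q2, q3, q4, q5, q6⟩ := ih (j + 1) (stepN a i j) (by omega) (l1 ▸ hi) s2 s3 s4 s5
    exact ⟨q1.trans p1, q2.trans l1, q3, q4, q5, q6⟩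

-- phase 2 of the inner loop (j >= i): the sorted prefix a[0..i] stays sorted
-- phase 2 single step
lemma step2 (i j : Nat) (a : List Int) (hij : i ≤ j) (hj : j < a.length) (hi : i < a.length)
    (hs : DSorted (a.take (i + 1))) :
    (stepN a i j).Perm a ∧ (stepN a i j).length = a.length ∧ DSorted ((stepN a i j).take (i + 1)) := by
  unfold stepN
  by_cases hc : a.getD i 0 > a.getD j 0
  · rw [if_pos hc]
    rcases eq_or_lt_of_le hij with rfl | hlt
    · exact absurd hc (lt_irrefl _)
    · rw [List.getD_eq_getElem a 0 hi, List.getD_eq_getElem a 0 hj] at *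
      refine ⟨List.set_set_perm hi hj, by simp, ?_⟩
      rw [List.take_set_of_le (by omega), take_set_succ a i _ hi]
      rw [take_succ_eq a i hi] at hs
      rw [DSorted, List.pairwise_append] at hs ⊢
      refine ⟨hs.1, List.pairwise_singleton _ _, ?_⟩
      intro e he b hb
      rcases List.mem_singleton.mp hb with rfl
      exact le_trans (le_of_lt hc) (hs.2.2 e he a[i] (List.mem_singleton.mpr rfl))
  · rw [if_neg hc]; exact ⟨List.Perm.refl a, rfl, hs⟩

lemma phase2 (i : Nat) : ∀ (js : List Nat) (a : List Int),
    (∀ j ∈ js, i ≤ j ∧ j < a.length) → i < a.length → DSorted (a.take (i + 1)) →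
    (js.foldl (fun a j => stepN a i j) a).Perm a ∧
    (js.foldl (fun a j => stepN a i j) a).length = a.length ∧
    DSorted ((js.foldl (fun a j => stepN a i j) a).take (i + 1)) := by
  intro js
  induction js with
  | nil => intro a _ _ hs; exact ⟨List.Perm.refl a, rfl, hs⟩
  | cons j t ih =>
    intro a hjs hi hs
    have hj := hjs j (List.mem_cons_self)
    obtain ⟨p2, l2, s2⟩ := step2 i j a hj.1 hj.2 hi hs
    have := ih (stepN a i j) (fun j' hj' => ⟨(hjs j' (List.mem_cons_of_mem _ hj')).1,
      l2 ▸ (hjs j' (List.mem_cons_of_mem _ hj')).2⟩) (l2 ▸ hi) s2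
    exact ⟨this.1.trans p2, this.2.1.trans l2, this.2.2⟩


-- the whole nested loop: after outer iterations i0..i0+k-1 the prefix grows sorted
lemma outer (n : Nat) : ∀ (k i0 : Nat) (a : List Int), i0 + k = n → a.length = n →
    DSorted (a.take i0) →
    ((List.range' i0 k).foldl
      (fun a i => (List.range (n - 1)).foldl (fun a j => stepN a i j) a) a).Perm a ∧
    ((List.range' i0 k).foldl
      (fun a i => (List.range (n - 1)).foldl (fun a j => stepN a i j) a) a).length = n ∧
    DSorted (((List.range' i0 k).foldl
      (fun a i => (List.range (n - 1)).foldl (fun a j => stepN a i j) a) a).take (i0 + k)) := by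
  intro k
  induction k with
  | zero => intro i0 a hk hl hs; exact ⟨List.Perm.refl a, hl, hs⟩
  | succ k ih =>
    intro i0 a hk hl hs
    have hi0 : i0 < n := by omega
    have hi0a : i0 < a.length := by omega
    rw [List.range'_succ, List.foldl_cons]
    -- one outer iteration: split the inner loop at i0
    have hsplit : List.range (n - 1) = List.range' 0 i0 ++ List.range' i0 (n - 1 - i0) := by
      rw [List.range_eq_range']
      have h9 : n - 1 = i0 + (n - 1 - i0) := by omega
      rw [h9]
      exact ((List.range'_append (s := 0) (m := i0) (n := n - 1 - i0) (step := 1)).symm.trans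
        (by norm_num))
    have hph1 := phase1 i0 i0 0 a (by omega) hi0a (by simp [DSorted])
      (by simpa [seg] using hs) (by simp) (by simp)
    obtain ⟨p1, l1, s2, s3, s4, s5⟩ := hph1
    set b1 := (List.range' 0 i0).foldl (fun a j => stepN a i0 j) a with hb1
    -- prefix of length i0+1 of b1 is sorted
    have hb1i : i0 < b1.length := by omega
    have hs1 : DSorted (b1.take (i0 + 1)) := by
      rw [take_succ_eq b1 i0 hb1i, DSorted, List.pairwise_append]
      refine ⟨by simpa using s2, List.pairwise_singleton _ _, ?_⟩
      intro e he f hf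
      rcases List.mem_singleton.mp hf with rfl
      have := s4 e (by simpa using he)
      rwa [List.getD_eq_getElem b1 0 hb1i] at this
    have hph2 := phase2 i0 (List.range' i0 (n - 1 - i0)) b1
      (fun j hj => by
        have := List.mem_range'_1.mp hj
        exact ⟨this.1, by omega⟩) hb1i hs1
    obtain ⟨q1, q2, q3⟩ := hph2
    set b2 := (List.range' i0 (n - 1 - i0)).foldl (fun a j => stepN a i0 j) b1 with hb2
    have hinner : (List.range (n - 1)).foldl (fun a j => stepN a i0 j) a = b2 := by
      rw [hsplit, List.foldl_append]
    rw [hinner]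
    have := ih (i0 + 1) b2 (by omega) (by omega) q3
    obtain ⟨r1, r2, r3⟩ := this
    refine ⟨r1.trans (q1.trans p1), r2, ?_⟩
    have : i0 + (k + 1) = (i0 + 1) + k := by omega
    rw [this]
    exact r3

-- A's sort, Nat-indexed
def sortA (l : List Int) : List Int :=
  (List.range l.length).foldl
    (fun a i => (List.range (l.length - 1)).foldl (fun a j => stepN a i j) a) l

lemma sortA_spec (l : List Int) : (sortA l).Perm l ∧ DSorted (sortA l) := by
  unfold sortA
  obtain ⟨p, hlen, hs⟩ := outer l.length l.length 0 l (by omega) rfl (by simp [DSorted])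
  rw [Nat.zero_add, List.take_of_length_le (le_of_eq hlen)] at hs
  rw [← List.range_eq_range'] at p hs
  exact ⟨p, hs⟩

lemma sortA_perm (l : List Int) : (sortA l).Perm l := (sortA_spec l).1

lemma sortA_sorted (l : List Int) : DSorted (sortA l) := (sortA_spec l).2

lemma mergeDesc_perm (xs ys : List Int) : (mergeDesc xs ys).Perm (xs ++ ys) := by
  induction xs, ys using mergeDesc.induct with
  | case1 ys => simp [mergeDesc]
  | case2 x xs => simp [mergeDesc]
  | case3 x xs y ys h ih => simp only [mergeDesc, if_pos h]; exact (ih.cons x)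
  | case4 x xs y ys h ih =>
    simp only [mergeDesc, if_neg h]
    exact (ih.cons y).trans (List.perm_middle.symm)

lemma mem_mergeDesc (xs ys : List Int) (z : Int) :
    z ∈ mergeDesc xs ys ↔ z ∈ xs ∨ z ∈ ys := by
  rw [(mergeDesc_perm xs ys).mem_iff]; simp

lemma mergeDesc_sorted (xs ys : List Int) (hx : DSorted xs) (hy : DSorted ys) :
    DSorted (mergeDesc xs ys) := by
  induction xs, ys using mergeDesc.induct with
  | case1 ys => simpa [mergeDesc] using hy
  | case2 x xs => simpa [mergeDesc] using hx
  | case3 x xs y ys h ih =>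
    simp only [mergeDesc, if_pos h]
    rw [DSorted, List.pairwise_cons]
    refine ⟨?_, ih hx.of_cons hy⟩
    intro z hz
    rcases (mem_mergeDesc _ _ z).mp hz with hz | hz
    · exact List.rel_of_pairwise_cons hx hz
    · rcases List.mem_cons.mp hz with rfl | hz
      · exact h
      · exact le_trans (List.rel_of_pairwise_cons hy hz) h
  | case4 x xs y ys h ih =>
    simp only [mergeDesc, if_neg h]
    rw [DSorted, List.pairwise_cons]
    refine ⟨?_, ih hx hy.of_cons⟩
    intro z hz
    have hxy : x ≤ y := le_of_not_ge h
    rcases (mem_mergeDesc _ _ z).mp hz with hz | hz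
    · rcases List.mem_cons.mp hz with rfl | hz
      · exact hxy
      · exact le_trans (List.rel_of_pairwise_cons hx hz) hxy
    · exact List.rel_of_pairwise_cons hy hz

lemma msortDesc_perm (a : List Int) : (msortDesc a).Perm a := by
  induction a using msortDesc.induct with
  | case1 a h => rw [msortDesc, if_pos h]
  | case2 a h ih1 ih2 =>
    rw [msortDesc, if_neg h]
    refine (mergeDesc_perm _ _).trans ?_
    have := ih1.append ih2
    rwa [List.take_append_drop] at this

lemma msortDesc_sorted (a : List Int) : DSorted (msortDesc a) := by
  induction a using msortDesc.induct with
  | case1 a h =>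
    rw [msortDesc, if_pos h]
    match a, h with
    | [], _ => exact List.Pairwise.nil
    | [x], _ => simp [DSorted]
  | case2 a h ih1 ih2 =>
    rw [msortDesc, if_neg h]
    exact mergeDesc_sorted _ _ ih1 ih2

lemma sortA_eq_msortDesc (l : List Int) : sortA l = msortDesc l := by
  refine PySem.List.eq_of_perm_of_pairwise_le_of_injective (fun x : Int => -x) neg_injective
    ((sortA_perm l).trans (msortDesc_perm l).symm) ?_ ?_
  · exact (sortA_sorted l).imp (fun h => neg_le_neg h)
  · exact (msortDesc_sorted l).imp (fun h => neg_le_neg h)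

-- string-side: a left fold appending str(x) is join('') of the map
lemma foldl_append_toStr (m : List Int) (z : String) :
    (m.foldl (fun z x => z ++ PySem.Int.toStr x) z).toList
      = z.toList ++ (m.map PySem.Int.toChars).flatten := by
  induction m generalizing z with
  | nil => simp
  | cons x t ih => simp [ih, PySem.Int.toList_toStr]

lemma charsJoin_nil (ls : List (List Char)) : PySem.Chars.join [] ls = ls.flatten := by
  show ([] : List Char).intercalate _ = _
  simp only [List.intercalate]
  induction ls with
  | nil => rfl
  | cons h t ih => cases t <;> simp_all [List.intersperse]

lemma inner_range (n : Nat) :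
    PySem.List.pyRange 0 ((n : Int) - 1) = (List.range (n - 1)).map (fun k : Nat => (k : Int)) := by
  cases n with
  | zero => rw [PySem.List.pyRange_one_eq_nil (by omega)]; simp
  | succ m =>
    have h2 : ((m + 1 : Nat) : Int) - 1 = ((m : Nat) : Int) := by push_cast; ring
    rw [h2, PySem.List.pyRange_zero_natCast]
    norm_num

lemma sort_fold_eq (l : List Int) :
    (PySem.List.pyRange 0 (PySem.List.len l) 1).foldl
      (fun a i => (PySem.List.pyRange 0 (PySem.List.len l - 1) 1).foldl
        (fun a j => konkatStep a i j) a) l = sortA l := by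
  show (PySem.List.pyRange 0 ((l.length : Int))).foldl _ l = _
  rw [PySem.List.pyRange_zero_natCast, List.foldl_map, sortA]
  apply PySem.List.foldl_congr_mem
  intro a i _
  show (PySem.List.pyRange 0 ((l.length : Int) - 1)).foldl _ a = _
  rw [inner_range]
  rw [List.foldl_map]
  apply PySem.List.foldl_congr_mem
  intro a j _
  exact konkatStep_natCast a i j

lemma konkat_eq_fold (l : List Int) (hlen : (sortA l).length = l.length) :
    konkat l = String.ofList ((sortA l).map PySem.Int.toChars).flatten := by
  show (PySem.List.pyRange 0 (PySem.List.len l) 1).foldl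
    (fun z i => z ++ PySem.Int.toStr (PySem.List.pyGetD ((PySem.List.pyRange 0 (PySem.List.len l) 1).foldl
      (fun a i => (PySem.List.pyRange 0 (PySem.List.len l - 1) 1).foldl
        (fun a j => konkatStep a i j) a) l) i 0)) "" = _
  rw [sort_fold_eq]
  have hb : PySem.List.len l = PySem.List.len (sortA l) := by
    simp [PySem.List.len, hlen]
  rw [hb]
  rw [PySem.List.foldl_pyRange_zero_pyGetD (sortA l) 0 (fun z x => z ++ PySem.Int.toStr x) ""]
  apply String.toList_inj.mp
  rw [foldl_append_toStr]
  simp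

-- ===== VERDICT (by name: the statement is the Claim_ definition above) =====
theorem konkat_spec : Claim_equal_konkat := by
  intro l _
  show konkat l = konkat_alt l
  rw [konkat_eq_fold l (sortA_perm l).length_eq, konkat_alt, sortA_eq_msortDesc]
  apply String.toList_inj.mp
  simp [PySem.Str.join, charsJoin_nil, Function.comp_def, PySem.Int.toList_toStr]
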